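-- pv_equiv track=rewrite | github.com/HyeonBhinKim/BaekJoon | 프로그래머스/1/160586. 대충 만든 자판/대충 만든 자판.py | solution
-- ===== SOURCE A (Python) =====
-- def solution(keymap, targets):
--     answer = []
--     number = {}
--     for i in keymap:
--         for index, ini in enumerate(i):
--             if ini in number:
--                 number[ini] = min(index+1, number[ini])
--             else:
--                 number[ini] = index + 1
--
--     for ans in targets:
--         tmp = 0
--         for x in ans:
--             if x in number:
--                 tmp += number[x]
--             else:
--                 tmp = -1
--                 break
--         answer.append(tmp)
--
--     return answer
-- ===== SOURCE B (Python) =====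
-- def solution(keymap, targets):
--     def cost(ch):
--         # min presses for ch across all keymap rows, or -1 if absent
--         best = -1
--         for row in keymap:
--             for i, c in enumerate(row):
--                 if c == ch:
--                     if best == -1 or i + 1 < best:
--                         best = i + 1
--                     break
--         return best
--
--     def score(t):
--         total = 0
--         for ch in t:
--             c = cost(ch)
--             if c == -1:
--                 return -1
--             total += c
--         return total
--
--     return [score(t) for t in targets]
-- ===== Notes on version B (the rewrite author's own statement) =====
-- stated objective: alternative
-- what changed: B drops A's precomputed char-to-min-press dict and instead, per target character, scans every keymap row for its first occurrence and takes the minimum position+1 across rows (-1 short-circuits a target when the char is absent).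
import Mathlib
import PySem

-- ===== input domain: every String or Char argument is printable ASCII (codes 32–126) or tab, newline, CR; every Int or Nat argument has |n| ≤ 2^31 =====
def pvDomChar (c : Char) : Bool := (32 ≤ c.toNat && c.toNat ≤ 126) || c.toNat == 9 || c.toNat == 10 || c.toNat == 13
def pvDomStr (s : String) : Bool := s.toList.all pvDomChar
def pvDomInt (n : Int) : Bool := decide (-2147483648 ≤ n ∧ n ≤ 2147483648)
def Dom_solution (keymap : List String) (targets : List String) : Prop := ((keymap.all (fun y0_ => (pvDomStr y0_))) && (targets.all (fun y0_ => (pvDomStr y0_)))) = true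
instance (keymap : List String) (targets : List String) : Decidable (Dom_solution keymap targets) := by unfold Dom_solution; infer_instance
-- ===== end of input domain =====

-- B replaces A's precomputed char→min-presses dict by a per-character scan of all keymap rows;
-- same return value, no speed claim (alternative decomposition).

-- ===== PORT A =====

-- the inner 'for index, ini in enumerate(i)' dict-update loop
def aStep (d : PySem.Dict Char Int) (p : Int × Char) : PySem.Dict Char Int :=
  if d.contains p.2 then d.insert p.2 (min (p.1 + 1) (d.getD p.2 0))
  else d.insert p.2 (p.1 + 1)

-- the 'for x in ans: … break' loop (break = returning -1)
def aSum (number : PySem.Dict Char Int) : List Char → Int → Int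
  | [], tmp => tmp
  | x :: xs, tmp =>
    if number.contains x then aSum number xs (tmp + number.getD x 0) else -1

def solution (keymap : List String) (targets : List String) : List Int :=
  let number : PySem.Dict Char Int :=
    keymap.foldl (fun d i => (PySem.List.enumerate i.toList 0).foldl aStep d) PySem.Dict.empty
  targets.foldl (fun answer ans => answer ++ [aSum number ans.toList 0]) []

-- ===== PORT B =====

-- the 'for i, c in enumerate(row): if c == ch: … break' scan (index counted from s)
def bFirstIdx : List Char → Char → Int → Option Int
  | [], _, _ => none
  | c :: cs, ch, s => if c = ch then some s else bFirstIdx cs ch (s + 1)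

-- cost(ch): min presses across rows, -1 if absent
def bCost (keymap : List String) (ch : Char) : Int :=
  keymap.foldl (fun best row =>
    match bFirstIdx row.toList ch 0 with
    | none => best
    | some i => if best = -1 ∨ i + 1 < best then i + 1 else best) (-1)

-- score(t): sum of costs, -1 short-circuit
def bScore (keymap : List String) : List Char → Int → Int
  | [], total => total
  | ch :: cs, total =>
    let c := bCost keymap ch
    if c = -1 then -1 else bScore keymap cs (total + c)

def solution_alt (keymap : List String) (targets : List String) : List Int :=
  targets.map (fun t => bScore keymap t.toList 0)

-- ===== PRECONDITION & SPEC =====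
def Spec_solution (keymap : List String) (targets : List String) (out : List Int) : Prop := out = solution_alt keymap targets
instance (keymap : List String) (targets : List String) (out : List Int) : Decidable (Spec_solution keymap targets out) := by unfold Spec_solution; infer_instance

-- ===== CLAIM (what is proved, stated in full; the proofs are below) =====
def Claim_equal_solution : Prop := ∀ (keymap : List String) (targets : List String), Dom_solution keymap targets → Spec_solution keymap targets (solution keymap targets)

-- ===== LEMMAS AND PROOFS =====

-- optional minimum: none = "not seen yet"
def omin : Option Int → Option Int → Option Int
  | none, o => o
  | some a, none => some a
  | some a, some b => some (min a b)

-- min of (index+1) over ALL occurrences of ch in l, indices counted from s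
def occMin : List Char → Char → Int → Option Int
  | [], _, _ => none
  | c :: cs, ch, s => if c = ch then omin (some (s + 1)) (occMin cs ch (s + 1)) else occMin cs ch (s + 1)

-- min of occMin over all rows (indices from 0)
def rowsMin (keymap : List String) (ch : Char) : Option Int :=
  keymap.foldl (fun acc row => omin acc (occMin row.toList ch 0)) none

theorem omin_none_right (o : Option Int) : omin o none = o := by
  cases o <;> rfl

theorem omin_assoc (a b c : Option Int) : omin (omin a b) c = omin a (omin b c) := by
  cases a <;> cases b <;> cases c <;> simp [omin, min_assoc]

theorem occMin_ge (l : List Char) (ch : Char) : ∀ s v, occMin l ch s = some v → s + 1 ≤ v := by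
  induction l with
  | nil => intro s v h; simp [occMin] at h
  | cons c cs ih =>
    intro s v h
    simp only [occMin] at h
    by_cases hc : c = ch
    · rw [if_pos hc] at h
      cases hrest : occMin cs ch (s + 1) with
      | none => rw [hrest, omin_none_right] at h; injection h with h; omega
      | some w =>
        rw [hrest] at h
        simp [omin] at h
        have := ih (s + 1) w hrest
        omega
    · rw [if_neg hc] at h
      have := ih (s + 1) v h
      omega

theorem occMin_eq_firstIdx (l : List Char) (ch : Char) :
    ∀ s, occMin l ch s = (bFirstIdx l ch s).map (· + 1) := by
  induction l with
  | nil => intro s; rfl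
  | cons c cs ih =>
    intro s
    simp only [occMin, bFirstIdx]
    by_cases hc : c = ch
    · rw [if_pos hc, if_pos hc]
      cases hrest : occMin cs ch (s + 1) with
      | none => rw [omin_none_right]; rfl
      | some w =>
        have hw := occMin_ge cs ch (s + 1) w hrest
        simp [omin, Option.map]
        omega
    · rw [if_neg hc, if_neg hc]; exact ih (s + 1)

theorem rowsMin_pos (keymap : List String) (ch : Char) :
    ∀ v, rowsMin keymap ch = some v → 1 ≤ v := by
  unfold rowsMin
  suffices h : ∀ (rows : List String) (acc : Option Int),
      (∀ w, acc = some w → 1 ≤ w) →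
      ∀ v, rows.foldl (fun acc row => omin acc (occMin row.toList ch 0)) acc = some v → 1 ≤ v by
    intro v hv
    exact h keymap none (by intro w hw; cases hw) v hv
  intro rows
  induction rows with
  | nil => intro acc hacc v h; exact hacc v h
  | cons r rs ih =>
    intro acc hacc v h
    refine ih (omin acc (occMin r.toList ch 0)) ?_ v h
    intro w hw
    cases acc with
    | none =>
      simp [omin] at hw
      have := occMin_ge r.toList ch 0 w (by rw [← hw])
      omega
    | some a =>
      have ha := hacc a rfl
      cases hocc : occMin r.toList ch 0 with
      | none => rw [hocc, omin_none_right] at hw; injection hw with hw; omega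
      | some b =>
        rw [hocc] at hw
        simp [omin] at hw
        have hb := occMin_ge r.toList ch 0 b hocc
        omega

-- encoding used by B: none ↔ -1
def enc : Option Int → Int
  | none => -1
  | some v => v

-- B's fold computes enc of the rowsMin fold, provided the accumulator is positive when present
theorem bCost_eq_enc (keymap : List String) (ch : Char) :
    bCost keymap ch = enc (rowsMin keymap ch) := by
  unfold bCost rowsMin
  suffices h : ∀ (rows : List String) (acc : Option Int),
      (∀ w, acc = some w → 1 ≤ w) →
      rows.foldl (fun best row =>
        match bFirstIdx row.toList ch 0 with
        | none => best
        | some i => if best = -1 ∨ i + 1 < best then i + 1 else best) (enc acc)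
      = enc (rows.foldl (fun acc row => omin acc (occMin row.toList ch 0)) acc) by
    exact h keymap none (by intro w hw; cases hw)
  intro rows
  induction rows with
  | nil => intro acc _; rfl
  | cons r rs ih =>
    intro acc hacc
    simp only [List.foldl_cons]
    have hocc := occMin_eq_firstIdx r.toList ch 0
    have hstep : (match bFirstIdx r.toList ch 0 with
        | none => enc acc
        | some i => if enc acc = -1 ∨ i + 1 < enc acc then i + 1 else enc acc)
        = enc (omin acc (occMin r.toList ch 0)) := by
      cases hfi : bFirstIdx r.toList ch 0 with
      | none => rw [hocc, hfi]; simp [omin_none_right]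
      | some i =>
        rw [hocc, hfi]
        simp only [Option.map]
        cases acc with
        | none => simp [enc, omin]
        | some a =>
          have ha := hacc a rfl
          simp only [enc, omin]
          by_cases hlt : i + 1 < a
          · rw [if_pos (Or.inr hlt)]; omega
          · rw [if_neg (by omega)]; omega
    rw [hstep]
    refine ih (omin acc (occMin r.toList ch 0)) ?_
    intro w hw
    cases acc with
    | none =>
      simp [omin] at hw
      have := occMin_ge r.toList ch 0 w (by rw [← hw])
      omega
    | some a =>
      have ha := hacc a rfl
      cases ho : occMin r.toList ch 0 with
      | none => rw [ho, omin_none_right] at hw; injection hw with hw; omega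
      | some b =>
        rw [ho] at hw; simp [omin] at hw
        have := occMin_ge r.toList ch 0 b ho
        omega

-- A's inner enumerate-fold, per key: it adds occMin of the row
theorem rowFold_get? (l : List Char) (ch : Char) :
    ∀ (s : Int) (d : PySem.Dict Char Int),
      ((PySem.List.enumerate l s).foldl aStep d).get? ch = omin (d.get? ch) (occMin l ch s) := by
  induction l with
  | nil => intro s d; simp [PySem.List.enumerate_nil, occMin, omin_none_right]
  | cons c cs ih =>
    intro s d
    rw [PySem.List.enumerate_cons, List.foldl_cons]
    rw [ih (s + 1) (aStep d (s, c))]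
    simp only [occMin]
    by_cases hc : c = ch
    · rw [if_pos hc]
      rw [← omin_assoc]
      congr 1
      -- (aStep d (s, c)).get? ch = omin (d.get? ch) (some (s+1))
      subst hc
      unfold aStep
      simp only
      by_cases hcon : d.contains c = true
      · rw [if_pos hcon]
        rw [PySem.Dict.get?_insert_self]
        cases hg : d.get? c with
        | none =>
          exfalso
          rw [PySem.Dict.contains_eq_isSome_get?, hg] at hcon
          simp at hcon
        | some v =>
          rw [PySem.Dict.getD_eq_get?_getD, hg]
          simp [omin, min_comm]
      · rw [if_neg hcon]
        rw [PySem.Dict.get?_insert_self]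
        have hg : d.get? c = none := by
          rw [PySem.Dict.contains_eq_isSome_get?] at hcon
          cases h : d.get? c with
          | none => rfl
          | some v => rw [h] at hcon; simp at hcon
        rw [hg]; rfl
    · rw [if_neg hc]
      congr 1
      unfold aStep
      simp only
      have hne : ch ≠ c := fun h => hc h.symm
      split_ifs <;> simp [PySem.Dict.get?_insert, hne]

-- the whole dict-build, per key
theorem buildDict_get? (keymap : List String) (ch : Char) :
    (keymap.foldl (fun d i => (PySem.List.enumerate i.toList 0).foldl aStep d) PySem.Dict.empty).get? ch
      = rowsMin keymap ch := by
  unfold rowsMin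
  suffices h : ∀ (rows : List String) (d : PySem.Dict Char Int) (acc : Option Int),
      d.get? ch = acc →
      (rows.foldl (fun d i => (PySem.List.enumerate i.toList 0).foldl aStep d) d).get? ch
        = rows.foldl (fun acc row => omin acc (occMin row.toList ch 0)) acc by
    exact h keymap PySem.Dict.empty none (PySem.Dict.get?_empty ch)
  intro rows
  induction rows with
  | nil => intro d acc h; exact h
  | cons r rs ih =>
    intro d acc h
    simp only [List.foldl_cons]
    exact ih _ _ (by rw [rowFold_get? r.toList ch 0 d, h])

-- the per-target loops agree
theorem sum_eq (keymap : List String) (number : PySem.Dict Char Int)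
    (hnum : ∀ ch, number.get? ch = rowsMin keymap ch) :
    ∀ (xs : List Char) (tmp : Int), aSum number xs tmp = bScore keymap xs tmp := by
  intro xs
  induction xs with
  | nil => intro tmp; rfl
  | cons x rest ih =>
    intro tmp
    simp only [aSum, bScore]
    have hcost := bCost_eq_enc keymap x
    cases hr : rowsMin keymap x with
    | none =>
      have hcon : number.contains x = false := by
        rw [PySem.Dict.contains_eq_isSome_get?, hnum x, hr]; rfl
      rw [hcon]
      have : bCost keymap x = -1 := by rw [hcost, hr]; rfl
      simp [this]
    | some v =>
      have hv := rowsMin_pos keymap x v hr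
      have hcon : number.contains x = true := by
        rw [PySem.Dict.contains_eq_isSome_get?, hnum x, hr]; rfl
      rw [hcon]
      have hc : bCost keymap x = v := by rw [hcost, hr]; rfl
      have hne : ¬ (bCost keymap x = -1) := by omega
      simp only [if_neg hne]
      have hgd : number.getD x 0 = v := by
        rw [PySem.Dict.getD_eq_get?_getD, hnum x, hr]
        rfl
      rw [hgd, hc]
      exact ih (tmp + v)

theorem foldl_append_map {α β : Type} (f : α → β) (ts : List α) :
    ∀ acc : List β, ts.foldl (fun a t => a ++ [f t]) acc = acc ++ ts.map f := by
  induction ts with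
  | nil => intro acc; simp
  | cons t rest ih => intro acc; simp [ih]

-- ===== VERDICT (by name: the statement is the Claim_ definition above) =====
theorem solution_spec : Claim_equal_solution := by
  intro keymap targets _
  unfold Spec_solution solution solution_alt
  simp only
  rw [foldl_append_map]
  simp only [List.nil_append]
  apply List.map_congr_left
  intro t _
  exact sum_eq keymap _ (fun ch => buildDict_get? keymap ch) t.toList 0
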